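-- pv_equiv track=rewrite | github.com/nickchen111/Leetcode | Array/3819. Rotate Non Negative Elements.py | rotateElements
-- ===== SOURCE A (Python) =====
-- from typing import List
--
-- def rotateElements(nums: List[int], k: int) -> List[int]:
--     a = [x for x in nums if x >= 0]
--     if not a:
--         return nums
--     k %= len(a)
--     a = a[k:] + a[:k]
--     j = 0
--     for i, x in enumerate(nums):
--         if x >= 0:
--             nums[i] = a[j]
--             j += 1
--     return nums
-- ===== SOURCE B (Python) =====
-- def rotateElements(nums, k):
--     # Three-reversal in-place rotation of the values at non-negative positions:
--     # reverse all of them, then the first m-k, then the last k.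
--     pos = [i for i, x in enumerate(nums) if x >= 0]
--     m = len(pos)
--     if m == 0:
--         return nums
--     k %= m
--
--     def rev(lo, hi):
--         while lo < hi:
--             i, j = pos[lo], pos[hi]
--             nums[i], nums[j] = nums[j], nums[i]
--             lo += 1
--             hi -= 1
--
--     rev(0, m - 1)
--     rev(0, m - k - 1)
--     rev(m - k, m - 1)
--     return nums
-- ===== Notes on version B (the rewrite author's own statement) =====
-- stated objective: alternative
-- what changed: B never builds the rotated list a[k:]+a[:k] or rewrites the sequence in a counting pass: it records the indices of the non-negative entries and rotates the values at those indices in place by three pairwise-swap reversals (reverse all m of them, then the first m-k, then the last k).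
import Mathlib
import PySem

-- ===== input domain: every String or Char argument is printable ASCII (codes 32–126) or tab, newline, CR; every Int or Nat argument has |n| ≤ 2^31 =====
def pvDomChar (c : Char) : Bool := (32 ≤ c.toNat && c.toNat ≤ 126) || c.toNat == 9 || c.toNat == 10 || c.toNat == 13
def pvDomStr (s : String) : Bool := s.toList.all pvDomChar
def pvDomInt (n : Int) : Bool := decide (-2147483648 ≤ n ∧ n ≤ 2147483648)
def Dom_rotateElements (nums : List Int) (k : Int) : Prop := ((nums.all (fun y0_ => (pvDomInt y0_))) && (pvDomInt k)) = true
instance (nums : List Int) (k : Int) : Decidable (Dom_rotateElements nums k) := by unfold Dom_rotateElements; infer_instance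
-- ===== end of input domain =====

-- B rotates by three in-place reversals of the values living at the non-negative
-- positions (reverse all, then the first m-k, then the last k), never materialising
-- the rotated list a[k:]+a[:k]; equivalence is about the return value (both A and B
-- also mutate nums in place in Python).

-- ===== PORT A =====
-- for i, x in enumerate(nums): if x >= 0: nums[i] = a2[j]; j += 1
-- (a2[j] is always in range here; the .getD default is never used)
def pvWriteA (a2 : List Int) : List Int → Nat → List Int
  | [], _ => []
  | x :: xs, j =>
    if x ≥ 0 then ((PySem.List.pyGet? a2 (j : Int)).getD x) :: pvWriteA a2 xs (j + 1)
    else x :: pvWriteA a2 xs j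

def rotateElements (nums : List Int) (k : Int) : List Int :=
  let a := nums.filter (fun x => decide (x ≥ 0))
  if a = [] then nums
  else
    let k2 := PySem.Int.mod k (a.length : Int)
    let a2 := PySem.List.slice a (some k2) none ++ PySem.List.slice a none (some k2)
    pvWriteA a2 nums 0

-- ===== PORT B =====
-- nums[i], nums[j] = nums[j], nums[i]  (indices are in range; getD default unused)
def pvSwap (l : List Int) (i j : Nat) : List Int :=
  let xi := l.getD i 0
  let xj := l.getD j 0
  (l.set i xj).set j xi

-- while lo < hi: swap nums[pos[lo]], nums[pos[hi]]; lo += 1; hi -= 1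
def pvRev (pos : List Nat) (l : List Int) (lo hi : Nat) : List Int :=
  if lo < hi then
    pvRev pos (pvSwap l (pos.getD lo 0) (pos.getD hi 0)) (lo + 1) (hi - 1)
  else l
termination_by hi - lo

def rotateElements_alt (nums : List Int) (k : Int) : List Int :=
  -- pos = [i for i, x in enumerate(nums) if x >= 0]  (indices are nonneg, kept as Nat)
  let pos := (nums.zipIdx.filter (fun p => decide (p.1 ≥ 0))).map (·.2)
  let m := pos.length
  if m = 0 then nums
  else
    -- k %= m yields 0 ≤ k < m, so .toNat is exact
    let kn := (PySem.Int.mod k (m : Int)).toNat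
    let l1 := pvRev pos nums 0 (m - 1)
    let l2 := pvRev pos l1 0 (m - kn - 1)
    pvRev pos l2 (m - kn) (m - 1)

-- ===== PRECONDITION & SPEC =====
def Spec_rotateElements (nums : List Int) (k : Int) (out : List Int) : Prop := out = rotateElements_alt nums k
instance (nums : List Int) (k : Int) (out : List Int) : Decidable (Spec_rotateElements nums k out) := by unfold Spec_rotateElements; infer_instance

-- ===== CLAIM (what is proved, stated in full; the proofs are below) =====
def Claim_equal_rotateElements : Prop := ∀ (nums : List Int) (k : Int), Dom_rotateElements nums k → Spec_rotateElements nums k (rotateElements nums k)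

-- ===== LEMMAS AND PROOFS =====

-- the list of non-negative positions, generalised over the enumeration start
def posF (l : List Int) (off : Nat) : List Nat :=
  ((l.zipIdx off).filter (fun p => decide (p.1 ≥ 0))).map (·.2)

lemma posF_nil (off : Nat) : posF [] off = [] := rfl

lemma posF_cons (x : Int) (l : List Int) (off : Nat) :
    posF (x :: l) off = if x ≥ 0 then off :: posF l (off + 1) else posF l (off + 1) := by
  simp only [posF, List.zipIdx_cons, List.filter_cons]
  split_ifs with h <;> simp_all

lemma posF_bounds : ∀ (l : List Int) (off : Nat) (p : Nat),
    p ∈ posF l off → off ≤ p ∧ p < off + l.length := by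
  intro l
  induction l with
  | nil => intro off p hp; simp [posF_nil] at hp
  | cons x xs ih =>
    intro off p hp
    rw [posF_cons] at hp
    by_cases hx : x ≥ 0
    · rw [if_pos hx] at hp
      rcases List.mem_cons.mp hp with h | h
      · subst h; simp only [List.length_cons]; omega
      · have := ih (off + 1) p h; simp; omega
    · rw [if_neg hx] at hp
      have := ih (off + 1) p hp; simp; omega

lemma posF_sorted : ∀ (l : List Int) (off : Nat), (posF l off).Pairwise (· < ·) := by
  intro l
  induction l with
  | nil => intro off; simp [posF_nil]
  | cons x xs ih =>
    intro off
    rw [posF_cons]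
    by_cases hx : x ≥ 0
    · rw [if_pos hx]
      refine List.pairwise_cons.mpr ⟨?_, ih (off + 1)⟩
      intro p hp
      have := posF_bounds xs (off + 1) p hp
      omega
    · rw [if_neg hx]; exact ih (off + 1)

lemma posF_map : ∀ (l : List Int) (off : Nat),
    (posF l off).map (fun p => l.getD (p - off) 0) = l.filter (fun x => decide (x ≥ 0)) := by
  intro l
  induction l with
  | nil => intro off; simp [posF_nil]
  | cons x xs ih =>
    intro off
    rw [posF_cons, List.filter_cons]
    have htail : (posF xs (off + 1)).map (fun p => (x :: xs).getD (p - off) 0)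
        = (posF xs (off + 1)).map (fun p => xs.getD (p - (off + 1)) 0) := by
      apply List.map_congr_left
      intro p hp
      have hb := posF_bounds xs (off + 1) p hp
      have : p - off = (p - (off + 1)) + 1 := by omega
      rw [this, List.getD_cons_succ]
    by_cases hx : x ≥ 0
    · rw [if_pos hx, if_pos (by simpa using hx)]
      rw [List.map_cons]
      simp only [Nat.sub_self, List.getD_cons_zero]
      rw [htail, ih (off + 1)]
    · rw [if_neg hx, if_neg (by simpa using hx)]
      rw [htail, ih (off + 1)]

lemma posF_count : ∀ (l : List Int) (off : Nat) (q : Nat), q < (posF l off).length →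
    ((l.take ((posF l off).getD q 0 - off)).filter (fun x => decide (x ≥ 0))).length = q := by
  intro l
  induction l with
  | nil => intro off q hq; simp [posF_nil] at hq
  | cons x xs ih =>
    intro off q hq
    rw [posF_cons] at hq ⊢
    by_cases hx : x ≥ 0
    · rw [if_pos hx] at hq ⊢
      match q with
      | 0 => simp
      | q + 1 =>
        simp only [List.getD_cons_succ]
        have hq' : q < (posF xs (off + 1)).length := by simpa using hq
        have hmem : (posF xs (off + 1)).getD q 0 ∈ posF xs (off + 1) := by
          rw [List.getD_eq_getElem _ _ hq']; exact List.getElem_mem hq'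
        have hb := posF_bounds xs (off + 1) _ hmem
        have hstep : (posF xs (off + 1)).getD q 0 - off
            = ((posF xs (off + 1)).getD q 0 - (off + 1)) + 1 := by omega
        rw [hstep, List.take_succ_cons, List.filter_cons, if_pos (by simpa using hx)]
        simpa using ih (off + 1) q hq'
    · rw [if_neg hx] at hq ⊢
      have hmem : (posF xs (off + 1)).getD q 0 ∈ posF xs (off + 1) := by
        rw [List.getD_eq_getElem _ _ hq]; exact List.getElem_mem hq
      have hb := posF_bounds xs (off + 1) _ hmem
      have hstep : (posF xs (off + 1)).getD q 0 - off
          = ((posF xs (off + 1)).getD q 0 - (off + 1)) + 1 := by omega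
      rw [hstep, List.take_succ_cons, List.filter_cons, if_neg (by simpa using hx)]
      simpa using ih (off + 1) q hq

lemma posF_mem_of_nonneg : ∀ (l : List Int) (off t : Nat), t < l.length →
    0 ≤ l.getD t 0 → (off + t) ∈ posF l off := by
  intro l
  induction l with
  | nil => intro off t ht; simp at ht
  | cons x xs ih =>
    intro off t ht hnn
    rw [posF_cons]
    match t with
    | 0 =>
      simp only [List.getD_cons_zero] at hnn
      rw [if_pos (by omega)]
      simp
    | t + 1 =>
      simp only [List.getD_cons_succ] at hnn
      have : (off + 1) + t ∈ posF xs (off + 1) := ih (off + 1) t (by simpa using ht) hnn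
      have heq : off + (t + 1) = (off + 1) + t := by omega
      rw [heq]
      by_cases hx : x ≥ 0
      · rw [if_pos hx]; exact List.mem_cons_of_mem _ this
      · rw [if_neg hx]; exact this

lemma pvSwap_length (l : List Int) (i j : Nat) : (pvSwap l i j).length = l.length := by
  simp [pvSwap]

lemma pvSwap_getD_ne (l : List Int) (i j t : Nat) (hti : t ≠ i) (hj : t ≠ j) :
    (pvSwap l i j).getD t 0 = l.getD t 0 := by
  simp [pvSwap, List.getD, List.getElem?_set_ne (Ne.symm hj), List.getElem?_set_ne (Ne.symm hti)]

lemma pvSwap_getD_i (l : List Int) (i j : Nat) (hi : i < l.length) (hj : j < l.length) :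
    (pvSwap l i j).getD i 0 = l.getD j 0 := by
  by_cases hij : i = j
  · subst hij
    simp [pvSwap, List.getD, List.getElem?_eq_getElem hi]
  · simp [pvSwap, List.getD, List.getElem?_set_ne (Ne.symm hij),
      List.getElem?_set_self', List.getElem?_eq_getElem hi, List.getElem?_eq_getElem hj]

lemma pvSwap_getD_j (l : List Int) (i j : Nat) (_hi : i < l.length) (hj : j < l.length) :
    (pvSwap l i j).getD j 0 = l.getD i 0 := by
  have h2 : j < (l.set i (l[j]?.getD 0)).length := by simpa using hj
  simp [pvSwap, List.getD, List.getElem?_set_self', List.getElem?_eq_getElem h2]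

lemma pos_getD_ne (pos : List Nat) (hs : pos.Pairwise (· < ·)) (q q' : Nat)
    (hq : q < pos.length) (hq' : q' < pos.length) (hne : q ≠ q') :
    pos.getD q 0 ≠ pos.getD q' 0 := by
  have hmono : ∀ (a b : Nat), a < b → (hb : b < pos.length) → pos.getD a 0 < pos.getD b 0 := by
    intro a b hab hb
    have := List.pairwise_iff_getElem.mp hs a b (by omega) hb hab
    rwa [List.getD_eq_getElem _ _ (by omega), List.getD_eq_getElem _ _ hb]
  rcases Nat.lt_or_ge q q' with h | h
  · exact Nat.ne_of_lt (hmono q q' h hq')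
  · have hlt : q' < q := by omega
    exact (Nat.ne_of_lt (hmono q' q hlt hq)).symm

lemma pvRev_length (pos : List Nat) : ∀ (n : Nat) (l : List Int) (lo hi : Nat), hi - lo ≤ n →
    (pvRev pos l lo hi).length = l.length := by
  intro n
  induction n with
  | zero =>
    intro l lo hi h
    rw [pvRev, if_neg (by omega)]
  | succ n ih =>
    intro l lo hi h
    rw [pvRev]
    split_ifs with hlh
    · rw [ih _ _ _ (by omega), pvSwap_length]
    · rfl

lemma pvRev_getD (pos : List Nat) (hs : pos.Pairwise (· < ·)) :
    ∀ (n : Nat) (l : List Int) (lo hi : Nat), hi - lo ≤ n →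
    hi < pos.length → (∀ p ∈ pos, p < l.length) →
    (∀ t : Nat, (∀ q : Nat, lo ≤ q → q ≤ hi → t ≠ pos.getD q 0) →
        (pvRev pos l lo hi).getD t 0 = l.getD t 0)
    ∧ (∀ q : Nat, lo ≤ q → q ≤ hi →
        (pvRev pos l lo hi).getD (pos.getD q 0) 0 = l.getD (pos.getD (lo + hi - q) 0) 0) := by
  have hmem : ∀ q, q < pos.length → pos.getD q 0 ∈ pos := fun q hq => by
    rw [List.getD_eq_getElem _ _ hq]; exact List.getElem_mem hq
  intro n
  induction n with
  | zero =>
    intro l lo hi h hhi hb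
    have hnl : ¬ lo < hi := by omega
    constructor
    · intro t ht; rw [pvRev, if_neg hnl]
    · intro q hq1 hq2
      have harith : lo + hi - q = q := by omega
      rw [pvRev, if_neg hnl, harith]
  | succ n ih =>
    intro l lo hi h hhi hb
    by_cases hlh : lo < hi
    · have hlolen : lo < pos.length := by omega
      have hilen : pos.getD lo 0 < l.length := hb _ (hmem lo hlolen)
      have hjlen : pos.getD hi 0 < l.length := hb _ (hmem hi hhi)
      have hb' : ∀ p ∈ pos, p < (pvSwap l (pos.getD lo 0) (pos.getD hi 0)).length := by
        rw [pvSwap_length]; exact hb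
      have ihs := ih (pvSwap l (pos.getD lo 0) (pos.getD hi 0)) (lo + 1) (hi - 1)
        (by omega) (by omega) hb'
      constructor
      · intro t ht
        rw [pvRev, if_pos hlh]
        rw [ihs.1 t (fun q hq1 hq2 => ht q (by omega) (by omega))]
        exact pvSwap_getD_ne l _ _ t (ht lo (le_refl _) (le_of_lt hlh))
          (ht hi (le_of_lt hlh) (le_refl _))
      · intro q hq1 hq2
        have hqlen : q < pos.length := by omega
        rw [pvRev, if_pos hlh]
        by_cases hqlo : q = lo
        · subst hqlo
          rw [ihs.1 _ (fun q' h1 h2 =>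
            pos_getD_ne pos hs q q' hqlen (by omega) (by omega))]
          rw [pvSwap_getD_i l _ _ hilen hjlen]
          have harith : q + hi - q = hi := by omega
          rw [harith]
        · by_cases hqhi : q = hi
          · subst hqhi
            rw [ihs.1 _ (fun q' h1 h2 =>
              pos_getD_ne pos hs q q' hqlen (by omega) (by omega))]
            rw [pvSwap_getD_j l _ _ hilen hjlen]
            have harith : lo + q - q = lo := by omega
            rw [harith]
          · have hmid := ihs.2 q (by omega) (by omega)
            have harith : lo + 1 + (hi - 1) - q = lo + hi - q := by omega
            rw [hmid, harith]
            have hrlen : lo + hi - q < pos.length := by omega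
            exact pvSwap_getD_ne l _ _ _
              (pos_getD_ne pos hs (lo + hi - q) lo hrlen hlolen (by omega))
              (pos_getD_ne pos hs (lo + hi - q) hi hrlen hhi (by omega))
    · have hnl : ¬ lo < hi := hlh
      constructor
      · intro t ht; rw [pvRev, if_neg hnl]
      · intro q hq1 hq2
        have harith : lo + hi - q = q := by omega
        rw [pvRev, if_neg hnl, harith]

lemma writeA_length (a2 : List Int) : ∀ (xs : List Int) (j : Nat),
    (pvWriteA a2 xs j).length = xs.length := by
  intro xs
  induction xs with
  | nil => intro j; rfl
  | cons x xs ih =>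
    intro j
    by_cases hx : x ≥ 0
    · simp [pvWriteA, if_pos hx, ih]
    · simp [pvWriteA, if_neg hx, ih]

lemma writeA_getD (a2 : List Int) : ∀ (xs : List Int) (j t : Nat),
    j + (xs.filter (fun x => decide (x ≥ 0))).length ≤ a2.length → t < xs.length →
    (pvWriteA a2 xs j).getD t 0 =
      if 0 ≤ xs.getD t 0 then a2.getD (j + ((xs.take t).filter (fun x => decide (x ≥ 0))).length) 0
      else xs.getD t 0 := by
  intro xs
  induction xs with
  | nil => intro j t _ ht; simp at ht
  | cons x xs ih =>
    intro j t hlen ht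
    rw [List.filter_cons] at hlen
    by_cases hx : x ≥ 0
    · rw [if_pos (by simpa using hx)] at hlen
      have hj : j < a2.length := by simp at hlen; omega
      have hget : (PySem.List.pyGet? a2 ((j : Nat) : Int)).getD x = a2.getD j 0 := by
        rw [PySem.List.pyGet?_natCast, List.getElem?_eq_getElem hj,
          List.getD_eq_getElem _ _ hj]
        rfl
      match t with
      | 0 =>
        simp only [pvWriteA, if_pos hx, List.getD_cons_zero, List.take_zero,
          List.filter_nil, List.length_nil, Nat.add_zero]
        exact hget
      | t + 1 =>
        simp only [pvWriteA, if_pos hx, List.getD_cons_succ, List.take_succ_cons,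
          List.filter_cons, if_pos (by simpa using hx : decide (x ≥ 0) = true),
          List.length_cons]
        rw [ih (j + 1) t (by simp at hlen ⊢; omega) (by simpa using ht)]
        have harith : j + (((xs.take t).filter (fun x => decide (x ≥ 0))).length + 1)
            = (j + 1) + ((xs.take t).filter (fun x => decide (x ≥ 0))).length := by omega
        rw [harith]
    · rw [if_neg (by simpa using hx)] at hlen
      match t with
      | 0 =>
        simp only [pvWriteA, if_neg hx, List.getD_cons_zero]
      | t + 1 =>
        simp only [pvWriteA, if_neg hx, List.getD_cons_succ, List.take_succ_cons,
          List.filter_cons, if_neg (by simpa using hx : ¬ decide (x ≥ 0) = true)]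
        exact ih j t hlen (by simpa using ht)

-- ===== VERDICT (by name: the statement is the Claim_ definition above) =====
lemma pos_getD_mem (pos : List Nat) (q : Nat) (hq : q < pos.length) : pos.getD q 0 ∈ pos := by
  rw [List.getD_eq_getElem _ _ hq]; exact List.getElem_mem hq

theorem rotateElements_spec : Claim_equal_rotateElements := by
  intro nums k _
  unfold Spec_rotateElements rotateElements rotateElements_alt
  have hposdef : ((nums.zipIdx.filter (fun p => decide (p.1 ≥ 0))).map (·.2)) = posF nums 0 := rfl
  rw [hposdef]
  set pos := posF nums 0 with hpos
  set f := nums.filter (fun x => decide (x ≥ 0)) with hf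
  have hmapf : pos.map (fun p => nums.getD (p - 0) 0) = f := posF_map nums 0
  have hlenpos : f.length = pos.length := by
    rw [← hmapf, List.length_map]
  have hsorted : pos.Pairwise (· < ·) := posF_sorted nums 0
  have hbound : ∀ p ∈ pos, p < nums.length := by
    intro p hp
    have := posF_bounds nums 0 p hp
    omega
  by_cases hfe : f = []
  · have hp0 : pos.length = 0 := by rw [← hlenpos, hfe]; rfl
    simp [hfe, hp0]
  · have hm : 0 < pos.length := by
      rcases Nat.eq_zero_or_pos pos.length with h | h
      · exact absurd (List.length_eq_zero_iff.mp (by omega ▸ h : pos.length = 0)) (by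
          intro hpe
          exact hfe (by rw [← hmapf, hpe]; rfl))
      · exact h
    set m := pos.length with hmdef
    have hm' : (0 : Int) < (m : Int) := by exact_mod_cast hm
    simp only [if_neg hfe]
    rw [hlenpos]
    set k2 := PySem.Int.mod k (m : Int) with hk2
    have h0 : 0 ≤ k2 := PySem.Int.mod_nonneg k hm'
    have h1 : k2 < (m : Int) := PySem.Int.mod_lt k hm'
    set kn := k2.toNat with hkn
    have hknm : kn < m := by omega
    rw [PySem.List.slice_from f h0, PySem.List.slice_to f h0]
    have hknd : k2.toNat = kn := rfl
    set a2 := f.drop kn ++ f.take kn with ha2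
    have ha2len : a2.length = m := by
      rw [ha2]; simp [hlenpos]; omega
    -- the three reversed lists
    set l1 := pvRev pos nums 0 (m - 1) with hl1
    have hlen1 : l1.length = nums.length := pvRev_length pos m nums 0 (m - 1) (by omega)
    set l2 := pvRev pos l1 0 (m - kn - 1) with hl2
    have hlen2 : l2.length = nums.length := by
      rw [hl2, pvRev_length pos m l1 0 (m - kn - 1) (by omega), hlen1]
    have hbound1 : ∀ p ∈ pos, p < l1.length := by rw [hlen1]; exact hbound
    have hbound2 : ∀ p ∈ pos, p < l2.length := by rw [hlen2]; exact hbound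
    have R1 := pvRev_getD pos hsorted m nums 0 (m - 1) (by omega) (by omega) hbound
    have R2 := pvRev_getD pos hsorted m l1 0 (m - kn - 1) (by omega) (by omega) hbound1
    have R3 := pvRev_getD pos hsorted m l2 (m - kn) (m - 1) (by omega) (by omega) hbound2
    have hRHSlen : (pvRev pos l2 (m - kn) (m - 1)).length = nums.length := by
      rw [pvRev_length pos m l2 (m - kn) (m - 1) (by omega), hlen2]
    have hfget : ∀ r, r < m → f.getD r 0 = nums.getD (pos.getD r 0) 0 := by
      intro r hr
      rw [← hmapf]
      rw [List.getD_eq_getElem _ _ (by simpa using hr), List.getElem_map]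
      rw [List.getD_eq_getElem _ _ hr]
      simp
    have ha2get : ∀ q, q < m → a2.getD q 0
        = nums.getD (pos.getD ((q + kn) % m) 0) 0 := by
      intro q hq
      rw [ha2, List.getD_eq_getElem?_getD]
      by_cases hcase : q < m - kn
      · rw [List.getElem?_append_left (by simp [hlenpos]; omega)]
        rw [List.getElem?_drop]
        have hmod : (q + kn) % m = kn + q := by
          rw [Nat.mod_eq_of_lt (by omega)]; omega
        rw [hmod, ← List.getD_eq_getElem?_getD, hfget (kn + q) (by omega)]
      · rw [List.getElem?_append_right (by simp [hlenpos]; omega)]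
        have hlendrop : (f.drop kn).length = m - kn := by simp [hlenpos]
        rw [hlendrop]
        rw [List.getElem?_take_of_lt (by omega : q - (m - kn) < kn)]
        have hmod : (q + kn) % m = q - (m - kn) := by
          rw [Nat.mod_eq_sub_mod (by omega), Nat.mod_eq_of_lt (by omega)]; omega
        rw [hmod, ← List.getD_eq_getElem?_getD, hfget (q - (m - kn)) (by omega)]
    have hifB : (if pos.length = 0 then nums
        else pvRev pos l2 (pos.length - kn) (pos.length - 1)) = pvRev pos l2 (m - kn) (m - 1) := by
      rw [if_neg (by omega : ¬ pos.length = 0)]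
    rw [hifB]
    -- elementwise equality
    apply List.ext_getElem
    · rw [writeA_length, hRHSlen]
    · intro t ht1 ht2
      rw [← List.getD_eq_getElem _ 0 ht1, ← List.getD_eq_getElem _ 0 ht2]
      have htn : t < nums.length := by rwa [writeA_length] at ht1
      have hLHS := writeA_getD a2 nums 0 t (by rw [← hf, ha2len, hlenpos]; omega) htn
      rw [Nat.zero_add] at hLHS
      by_cases hneg : 0 ≤ nums.getD t 0
      · -- t is a non-negative position
        have htmem : t ∈ pos := by
          have := posF_mem_of_nonneg nums 0 t htn hneg
          simpa using this
        obtain ⟨q, hq, hqt⟩ := List.getElem_of_mem htmem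
        have hqd : pos.getD q 0 = t := by rw [List.getD_eq_getElem _ _ hq]; exact hqt
        have hcnt : ((nums.take t).filter (fun x => decide (x ≥ 0))).length = q := by
          have := posF_count nums 0 q hq
          rw [Nat.sub_zero, hqd] at this
          exact this
        rw [hLHS, if_pos hneg, hcnt, ha2get q hq, ← hqd]
        by_cases hcase : q < m - kn
        · rw [R3.1 (pos.getD q 0) (fun q' h1 h2 =>
            pos_getD_ne pos hsorted q q' hq (by omega) (by omega))]
          rw [R2.2 q (by omega) (by omega)]
          rw [R1.2 (0 + (m - kn - 1) - q) (by omega) (by omega)]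
          have harith : 0 + (m - 1) - (0 + (m - kn - 1) - q) = (q + kn) % m := by
            have hmm : (q + kn) % m = q + kn := Nat.mod_eq_of_lt (by omega)
            omega
          rw [harith]
        · rw [R3.2 q (by omega) (by omega)]
          rw [R2.1 (pos.getD (m - kn + (m - 1) - q) 0) (fun q' h1 h2 =>
            pos_getD_ne pos hsorted (m - kn + (m - 1) - q) q' (by omega) (by omega) (by omega))]
          rw [R1.2 (m - kn + (m - 1) - q) (by omega) (by omega)]
          have harith : 0 + (m - 1) - (m - kn + (m - 1) - q) = (q + kn) % m := by
            have hmm : (q + kn) % m = q + kn - m := by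
              rw [Nat.mod_eq_sub_mod (by omega), Nat.mod_eq_of_lt (by omega)]
            omega
          rw [harith]
      · -- negative entry: untouched everywhere
        have hnotin : t ∉ pos := by
          intro hmem
          have hfmem : nums.getD (t - 0) 0 ∈ f := by
            rw [← hmapf]
            exact List.mem_map_of_mem hmem
          rw [Nat.sub_zero, hf] at hfmem
          exact hneg (by simpa using List.of_mem_filter hfmem)
        have havoid : ∀ q' : Nat, q' < m → t ≠ pos.getD q' 0 := by
          intro q' hq' heq
          exact hnotin (heq ▸ pos_getD_mem pos q' hq')
        rw [hLHS, if_neg hneg]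
        rw [R3.1 t (fun q' h1 h2 => havoid q' (by omega))]
        rw [R2.1 t (fun q' h1 h2 => havoid q' (by omega))]
        rw [R1.1 t (fun q' h1 h2 => havoid q' (by omega))]
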